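-- pv_equiv track=rewrite | github.com/VyacheslavZalygin/PyEducation2021 | AnotherEGE/jobs.24/24-7.py | f
-- ===== SOURCE A (Python) =====
-- def f(a):
--     mx = 0
--     c = 0
--     for i in range(0, len(a), 3):
--         if a[i:i+3] == 'XYZ' or a[i:i+3] == 'ZYX':
--             c += 1
--         else:
--             mx = max(mx, c)
--             c = 0
--     mx = max(mx, c)
--     return mx
-- ===== SOURCE B (Python) =====
-- def f(a):
--     marks = ''.join('1' if a[i:i+3] in ('XYZ', 'ZYX') else '0' for i in range(0, len(a), 3))
--     k = 0
--     while '1' * (k + 1) in marks: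
--         k += 1
--     return k
-- ===== Notes on version B (the rewrite author's own statement) =====
-- stated objective: alternative
-- what changed: B first builds the per-block match-marker string in one comprehension pass and then finds the longest run of matching blocks by a growing substring search over that marker string, instead of A's single loop tracking a running count and running max inline.
import Mathlib
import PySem

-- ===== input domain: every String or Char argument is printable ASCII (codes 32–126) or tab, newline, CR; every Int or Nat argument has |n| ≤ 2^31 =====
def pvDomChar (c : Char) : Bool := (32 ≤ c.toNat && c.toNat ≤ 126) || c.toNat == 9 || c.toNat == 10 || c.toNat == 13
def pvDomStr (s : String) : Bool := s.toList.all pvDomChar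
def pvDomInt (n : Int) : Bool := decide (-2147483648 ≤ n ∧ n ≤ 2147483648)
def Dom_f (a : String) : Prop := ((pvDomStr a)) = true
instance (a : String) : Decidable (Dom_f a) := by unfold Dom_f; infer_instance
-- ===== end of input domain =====

-- B builds the block-match marker string once and finds the longest run of matches by a
-- growing substring search over it, instead of A's inline running count and max (a different
-- decomposition; a timing run measured B faster at the largest size).

-- ===== PORT A =====
def f (a : String) : Int :=
  let r := (PySem.List.pyRange 0 (PySem.Str.len a) 3).foldl
    (fun (s : Int × Int) i =>
      if PySem.Str.slice a (some i) (some (i+3)) = "XYZ" ∨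
         PySem.Str.slice a (some i) (some (i+3)) = "ZYX"
      then (s.1, s.2 + 1) else (max s.1 s.2, 0)) (0, 0)
  max r.1 r.2

-- ===== PORT B =====
-- the while loop: fuel bounds the iteration count; the loop body runs at most len(marks) times
def fAltGo (marks : String) : Nat → Nat → Nat
  | 0, k => k
  | fuel+1, k =>
    if PySem.Str.isIn (String.ofList (List.replicate (k+1) '1')) marks
    then fAltGo marks fuel (k+1) else k

def f_alt (a : String) : Int :=
  let marks := PySem.Str.join "" ((PySem.List.pyRange 0 (PySem.Str.len a) 3).map
    (fun i => if PySem.Str.slice a (some i) (some (i+3)) = "XYZ" ∨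
                 PySem.Str.slice a (some i) (some (i+3)) = "ZYX"
              then "1" else "0"))
  (fAltGo marks (marks.toList.length + 1) 0 : Int)

-- ===== PRECONDITION & SPEC =====
def Spec_f (a : String) (out : Int) : Prop := out = f_alt a
instance (a : String) (out : Int) : Decidable (Spec_f a out) := by unfold Spec_f; infer_instance

-- ===== CLAIM (what is proved, stated in full; the proofs are below) =====
def Claim_equal_f : Prop := ∀ (a : String), Dom_f a → Spec_f a (f a)

-- ===== LEMMAS AND PROOFS =====

-- the marker character of one block
def pvMk (a : String) (i : Int) : Char :=
  if PySem.Str.slice a (some i) (some (i+3)) = "XYZ" ∨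
     PySem.Str.slice a (some i) (some (i+3)) = "ZYX"
  then '1' else '0'

-- (leading '1'-run length, longest '1'-run length) of a char list
def pvF (cs : List Char) : Nat × Nat :=
  cs.foldr (fun c p => if c = '1' then (p.1 + 1, max (p.1 + 1) p.2) else (0, p.2)) (0, 0)

lemma pvF_le (cs : List Char) : (pvF cs).1 ≤ (pvF cs).2 ∧ (pvF cs).2 ≤ cs.length := by
  induction cs with
  | nil => simp [pvF]
  | cons c cs ih =>
    simp only [pvF, List.foldr_cons, List.length_cons] at *
    split_ifs <;> simp <;> omega

lemma pvA_fold (cs : List Char) : ∀ (mx c : Nat),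
    (let p := cs.foldl
        (fun (s : Int × Int) ch => if ch = '1' then (s.1, s.2 + 1) else (max s.1 s.2, 0))
        ((mx : Int), (c : Int));
      max p.1 p.2) = ((max mx (max (c + (pvF cs).1) (pvF cs).2) : Nat) : Int) := by
  induction cs with
  | nil => intro mx c; simp [pvF, Nat.cast_max]
  | cons ch cs ih =>
    intro mx c
    by_cases h : ch = '1'
    · have := (pvF_le cs).1
      simp only [pvF, List.foldr_cons, List.foldl_cons, h, ite_true] at *
      have h1 : ((c : Int) + 1) = ((c + 1 : Nat) : Int) := by push_cast; ring
      rw [h1, ih mx (c + 1)]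
      congr 1
      omega
    · have := (pvF_le cs).1
      simp only [pvF, List.foldr_cons, List.foldl_cons, if_neg h] at *
      have h1 : (max (mx : Int) (c : Int)) = ((max mx c : Nat) : Int) := by
        exact (Nat.cast_max ..).symm
      rw [h1]
      have h2 := ih (max mx c) 0
      rw [Nat.cast_zero] at h2
      rw [h2]
      congr 1
      omega

lemma pv_repl_prefix (cs : List Char) : ∀ k, List.replicate k '1' <+: cs ↔ k ≤ (pvF cs).1 := by
  induction cs with
  | nil => intro k; simp [pvF]
  | cons c cs ih =>
    intro k
    cases k with
    | zero => simp
    | succ k =>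
      rw [List.replicate_succ, List.cons_prefix_cons, ih k]
      by_cases h : c = '1' <;> simp [pvF, h]
      exact fun hc => absurd hc.symm h

lemma pv_repl_infix (cs : List Char) : ∀ k, List.replicate k '1' <:+: cs ↔ k ≤ (pvF cs).2 := by
  induction cs with
  | nil => intro k; simp [pvF]
  | cons c cs ih =>
    intro k
    rw [List.infix_cons_iff, ih k, pv_repl_prefix (c :: cs) k]
    by_cases h : c = '1' <;>
      simp only [pvF, List.foldr_cons, h, ite_true, ite_false] <;>
      simp only [pvF] at * <;> omega

lemma pv_go (marks : String) : ∀ fuel k, k ≤ (pvF marks.toList).2 →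
    (pvF marks.toList).2 - k < fuel → fAltGo marks fuel k = (pvF marks.toList).2 := by
  intro fuel
  induction fuel with
  | zero => intro k _ h; omega
  | succ fuel ih =>
    intro k hk hf
    rw [fAltGo]
    by_cases h : k + 1 ≤ (pvF marks.toList).2
    · rw [if_pos, ih (k+1) h (by omega)]
      rw [PySem.Str.isIn_eq]
      simp only [String.toList_ofList]
      exact (PySem.Chars.isIn_iff_infix ..).mpr ((pv_repl_infix ..).mpr h)
    · rw [if_neg, show k = (pvF marks.toList).2 from by omega]
      intro hc
      rw [PySem.Str.isIn_eq] at hc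
      simp only [String.toList_ofList] at hc
      exact h ((pv_repl_infix ..).mp ((PySem.Chars.isIn_iff_infix ..).mp hc))

-- ===== VERDICT (by name: the statement is the Claim_ definition above) =====
theorem f_spec : Claim_equal_f := by
  intro a _
  unfold Spec_f
  have hmk : ∀ (L : List Int),
      (PySem.Str.join "" (L.map (fun i =>
        if PySem.Str.slice a (some i) (some (i+3)) = "XYZ" ∨
           PySem.Str.slice a (some i) (some (i+3)) = "ZYX" then "1" else "0"))).toList
      = L.map (pvMk a) := by
    intro L
    rw [PySem.Str.toList_join]
    have : (L.map (fun i =>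
        if PySem.Str.slice a (some i) (some (i+3)) = "XYZ" ∨
           PySem.Str.slice a (some i) (some (i+3)) = "ZYX" then "1" else "0")).map String.toList
        = (L.map (pvMk a)).map (fun c => [c]) := by
      simp only [List.map_map]
      refine List.map_congr_left ?_
      intro i _
      by_cases h : PySem.Str.slice a (some i) (some (i+3)) = "XYZ" ∨
           PySem.Str.slice a (some i) (some (i+3)) = "ZYX" <;>
        simp [pvMk, h]
    rw [this]
    exact PySem.Chars.join_nil_singletons _
  set L := PySem.List.pyRange 0 (PySem.Str.len a) 3 with hL
  have hB : f_alt a = (((pvF (L.map (pvMk a))).2 : Nat) : Int) := by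
    unfold f_alt
    rw [← hL]
    have hm := hmk L
    set M := PySem.Str.join "" (L.map (fun i =>
        if PySem.Str.slice a (some i) (some (i+3)) = "XYZ" ∨
           PySem.Str.slice a (some i) (some (i+3)) = "ZYX" then "1" else "0")) with hM
    show ((fAltGo M (M.toList.length + 1) 0 : Nat) : Int) = _
    rw [pv_go M _ 0 (Nat.zero_le _)
      (by have := (pvF_le M.toList).2; omega), hm]
  have hA : f a = (((pvF (L.map (pvMk a))).2 : Nat) : Int) := by
    unfold f
    rw [← hL]
    have hstep : ∀ (s : Int × Int) (i : Int),
        (if PySem.Str.slice a (some i) (some (i+3)) = "XYZ" ∨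
            PySem.Str.slice a (some i) (some (i+3)) = "ZYX"
         then (s.1, s.2 + 1) else (max s.1 s.2, (0 : Int)))
        = (if pvMk a i = '1' then (s.1, s.2 + 1) else (max s.1 s.2, 0)) := by
      intro s i
      by_cases h : PySem.Str.slice a (some i) (some (i+3)) = "XYZ" ∨
          PySem.Str.slice a (some i) (some (i+3)) = "ZYX" <;>
        simp [pvMk, h]
    simp only [hstep]
    show max ((L.foldl (fun (s : Int × Int) i =>
        if pvMk a i = '1' then (s.1, s.2 + 1) else (max s.1 s.2, 0)) (0, 0))).1
      ((L.foldl (fun (s : Int × Int) i =>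
        if pvMk a i = '1' then (s.1, s.2 + 1) else (max s.1 s.2, 0)) (0, 0))).2 = _
    have hfm : (L.map (pvMk a)).foldl
        (fun (s : Int × Int) ch => if ch = '1' then (s.1, s.2 + 1) else (max s.1 s.2, 0)) (0, 0)
        = L.foldl (fun (s : Int × Int) i =>
            if pvMk a i = '1' then (s.1, s.2 + 1) else (max s.1 s.2, 0)) (0, 0) :=
      List.foldl_map
    rw [← hfm]
    have hfold := pvA_fold (L.map (pvMk a)) 0 0
    simp only [Nat.cast_zero] at hfold
    rw [hfold]
    congr 1
    have := (pvF_le (L.map (pvMk a))).1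
    omega
  rw [hA, hB]
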